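-- pv_equiv track=rewrite | github.com/LEAHPARAPHAEL/spa | shelters/manage_json.py | reorder_dict
-- ===== SOURCE A (Python) =====
-- def reorder_dict(dog_data):
--     # Define the exact order you want
--     desired_order = [
--         "source",
--         "url",
--         "name",
--         "adopted",
--         "species",
--         "sex",
--         "age_text",
--         "age",
--         "category",
--         "breed",
--         "matched_breed",
--         "colors",
--         "accepts_dogs",
--         "accepts_cats",
--         "accepts_children",
--         "establishment",
--         "establishment_url",
--         "image_urls"
--     ]
--
--     ordered_dict = {}
--
--     for key in desired_order:
--         if key in dog_data:
--             ordered_dict[key] = dog_data[key]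
--     return ordered_dict
-- ===== SOURCE B (Python) =====
-- def reorder_dict(dog_data):
--     desired_order = [
--         "source",
--         "url",
--         "name",
--         "adopted",
--         "species",
--         "sex",
--         "age_text",
--         "age",
--         "category",
--         "breed",
--         "matched_breed",
--         "colors",
--         "accepts_dogs",
--         "accepts_cats",
--         "accepts_children",
--         "establishment",
--         "establishment_url",
--         "image_urls",
--     ]
--     idx = {k: i for i, k in enumerate(desired_order)}
--     keep = sorted((k for k in dog_data if k in idx), key=lambda k: idx[k])
--     return {k: dog_data[k] for k in keep}
-- ===== Notes on version B (the rewrite author's own statement) =====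
-- stated objective: alternative
-- what changed: B drives the loop off the input dict instead of the fixed key list: it builds a key->position index from desired_order, filters the input's keys to those with an index, sorts them by that index, and builds the result dict from the sorted keys.
import Mathlib
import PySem

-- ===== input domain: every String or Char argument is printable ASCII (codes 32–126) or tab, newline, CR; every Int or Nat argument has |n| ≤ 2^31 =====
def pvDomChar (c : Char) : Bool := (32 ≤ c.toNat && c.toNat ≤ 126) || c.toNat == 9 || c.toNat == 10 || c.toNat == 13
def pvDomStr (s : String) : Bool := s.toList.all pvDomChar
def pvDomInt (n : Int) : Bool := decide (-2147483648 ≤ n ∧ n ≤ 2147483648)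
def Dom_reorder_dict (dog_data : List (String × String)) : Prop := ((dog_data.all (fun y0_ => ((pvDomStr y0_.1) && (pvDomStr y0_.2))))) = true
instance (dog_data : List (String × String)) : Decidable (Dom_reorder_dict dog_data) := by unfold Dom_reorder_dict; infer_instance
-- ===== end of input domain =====

-- B reorders by building a key->position index, filtering and sorting the input's keys by it (alternative decomposition; same results).


-- the fixed `desired_order` literal used by both Pythons
def pvDesired : List String :=
  ["source", "url", "name", "adopted", "species", "sex", "age_text", "age",
   "category", "breed", "matched_breed", "colors", "accepts_dogs", "accepts_cats",
   "accepts_children", "establishment", "establishment_url", "image_urls"]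

-- ===== PORT A =====
-- 'for key in desired_order: if key in dog_data: ordered_dict[key] = dog_data[key]'
def reorder_dict (dog_data : List (String × String)) : List (String × String) :=
  (pvDesired.foldl
    (fun od key => if (PySem.Dict.mk dog_data).contains key then
        od.insert key ((PySem.Dict.mk dog_data).getD key "") else od)
    PySem.Dict.empty).items

-- ===== PORT B =====
-- idx = {k: i for i, k in enumerate(desired_order)}
def pvIdx : PySem.Dict String Int :=
  (PySem.List.enumerate pvDesired 0).foldl (fun d p => d.insert p.2 p.1) PySem.Dict.empty

def reorder_dict_alt (dog_data : List (String × String)) : List (String × String) :=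
  -- keep = sorted((k for k in dog_data if k in idx), key=lambda k: idx[k])
  (PySem.List.sorted
      ((PySem.Dict.mk dog_data).keys.filter (fun k => pvIdx.contains k))
      (fun k => pvIdx.getD k 0) false
  -- '{k: dog_data[k] for k in keep}': keep's keys are distinct (dict keys), so the comprehension is this map
  ).map (fun k => (k, (PySem.Dict.mk dog_data).getD k ""))

-- ===== PRECONDITION & SPEC =====
-- Pre_ excludes association lists with duplicate keys: the Python argument is a dict, whose keys are always distinct, so no Python input is excluded.
def Pre_reorder_dict (dog_data : List (String × String)) : Prop :=
  (dog_data.map Prod.fst).Nodup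
instance (dog_data : List (String × String)) : Decidable (Pre_reorder_dict dog_data) := by unfold Pre_reorder_dict; infer_instance

def pvWitness_reorder_dict : (List (String × String)) := [("name", "Rex"), ("age", "3"), ("toy", "ball")]

def Spec_reorder_dict (dog_data : List (String × String)) (out : List (String × String)) : Prop := out = reorder_dict_alt dog_data
instance (dog_data : List (String × String)) (out : List (String × String)) : Decidable (Spec_reorder_dict dog_data out) := by unfold Spec_reorder_dict; infer_instance

-- ===== CLAIM (what is proved, stated in full; the proofs are below) =====
def Claim_equal_reorder_dict : Prop := ∀ (dog_data : List (String × String)), Dom_reorder_dict dog_data → Pre_reorder_dict dog_data → Spec_reorder_dict dog_data (reorder_dict dog_data)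

-- ===== LEMMAS AND PROOFS =====

-- closed facts about the fixed key list and its index dict
theorem pvIdx_keys : pvIdx.keys = pvDesired := by decide

theorem pvDesired_nodup : pvDesired.Nodup := by decide

theorem pvDesired_pairwise :
    pvDesired.Pairwise (fun a b => pvIdx.getD a 0 < pvIdx.getD b 0) := by decide

theorem reorder_dict_eq_filter_map (dog_data : List (String × String)) :
    reorder_dict dog_data =
      (pvDesired.filter (fun k => (PySem.Dict.mk dog_data).contains k)).map
        (fun k => (k, (PySem.Dict.mk dog_data).getD k "")) := by
  unfold reorder_dict
  rw [PySem.List.foldl_if_eq_foldl_filter]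
  exact (PySem.Dict.items_foldl_insert_fresh
        (pvDesired.filter (fun k => (PySem.Dict.mk dog_data).contains k))
        (fun a => a) (fun a => (PySem.Dict.mk dog_data).getD a "")
        PySem.Dict.empty
        (fun a _ => PySem.Dict.contains_empty a)
        (by simpa using (pvDesired_nodup.filter _))).trans (by simp [PySem.Dict.empty])

theorem reorder_dict_spec' (dog_data : List (String × String))
    (h : Pre_reorder_dict dog_data) :
    reorder_dict dog_data = reorder_dict_alt dog_data := by
  unfold reorder_dict_alt
  rw [reorder_dict_eq_filter_map]
  set d : PySem.Dict String String := PySem.Dict.mk dog_data with hd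
  have hkeys : d.keys.Nodup := by
    simpa [hd, PySem.Dict.keys, PySem.Dict.items] using h
  have hsorted :
      PySem.List.sorted (d.keys.filter (fun k => pvIdx.contains k))
        (fun k => pvIdx.getD k 0) false
        = pvDesired.filter (fun k => d.contains k) := by
    apply PySem.List.sorted_eq_of_perm_of_pairwise_lt
    · apply (List.perm_ext_iff_of_nodup (pvDesired_nodup.filter _) (hkeys.filter _)).mpr
      intro a
      simp only [List.mem_filter]
      constructor
      · rintro ⟨ha, hc⟩
        have ha' : a ∈ d.keys := (PySem.Dict.contains_iff_mem_keys _ _).mp (by simpa using hc)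
        have hi : pvIdx.contains a = true := by
          rw [PySem.Dict.contains_iff_mem_keys, pvIdx_keys]; exact ha
        exact ⟨ha', by simpa using hi⟩
      · rintro ⟨ha, hc⟩
        have ha' : a ∈ pvIdx.keys := (PySem.Dict.contains_iff_mem_keys _ _).mp (by simpa using hc)
        have hi : d.contains a = true :=
          (PySem.Dict.contains_iff_mem_keys _ _).mpr ha
        exact ⟨by rwa [pvIdx_keys] at ha', by simpa using hi⟩
    · exact pvDesired_pairwise.filter _
  rw [hsorted]

-- ===== VERDICT (by name: the statement is the Claim_ definition above) =====
theorem reorder_dict_spec : Claim_equal_reorder_dict := by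
  intro dog_data _ hpre
  exact reorder_dict_spec' dog_data hpre
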